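-- pv_equiv track=rewrite | github.com/paulklemstine/factor | lean/demo/New/ComplexityTheory1/demos/sensitivity_demo.py | find_sunflower
-- ===== SOURCE A (Python) =====
-- import itertools
-- from typing import Callable, List, Tuple, Set
--
-- def find_sunflower(family: List[Set[int]], p: int) -> Tuple[List[Set[int]], Set[int]]:
--     """Find a sunflower of size p in the family (brute force)."""
--     for combo in itertools.combinations(range(len(family)), p):
--         sets = [family[i] for i in combo]
--         # Check if they form a sunflower
--         # Core = intersection of all sets
--         core = sets[0].copy()
--         for s in sets[1:]:
--             core &= s
--         # Petals must be pairwise disjoint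
--         petals = [s - core for s in sets]
--         is_sunflower = True
--         for i in range(len(petals)):
--             for j in range(i + 1, len(petals)):
--                 if petals[i] & petals[j]:
--                     is_sunflower = False
--                     break
--             if not is_sunflower:
--                 break
--         if is_sunflower:
--             return sets, core
--     return [], set()
-- ===== SOURCE B (Python) =====
-- import itertools
-- from typing import List, Tuple, Set
--
-- def find_sunflower(family: List[Set[int]], p: int) -> Tuple[List[Set[int]], Set[int]]:
--     """Find a sunflower of size p in the family (brute force).
--
--     Instead of enumerating index tuples and testing petal disjointness with a
--     nested pairwise double loop, pick the candidate sets directly with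
--     itertools.combinations(family, p) and verify disjointness in ONE pass,
--     accumulating the union of the petals seen so far.
--     """
--     for combo in itertools.combinations(family, p):
--         sets = list(combo)
--         core = sets[0].copy()
--         for s in sets[1:]:
--             core &= s
--         seen = set()
--         for s in sets:
--             petal = s - core
--             if petal & seen:
--                 break
--             seen |= petal
--         else:
--             return sets, core
--     return [], set()
-- ===== Notes on version B (the rewrite author's own statement) =====
-- stated objective: simpler
-- what changed: B combines over the family directly (no index tuples) and replaces the nested pairwise petal-disjointness double loop with a single pass that accumulates the union of petals seen so far.
import Mathlib
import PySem

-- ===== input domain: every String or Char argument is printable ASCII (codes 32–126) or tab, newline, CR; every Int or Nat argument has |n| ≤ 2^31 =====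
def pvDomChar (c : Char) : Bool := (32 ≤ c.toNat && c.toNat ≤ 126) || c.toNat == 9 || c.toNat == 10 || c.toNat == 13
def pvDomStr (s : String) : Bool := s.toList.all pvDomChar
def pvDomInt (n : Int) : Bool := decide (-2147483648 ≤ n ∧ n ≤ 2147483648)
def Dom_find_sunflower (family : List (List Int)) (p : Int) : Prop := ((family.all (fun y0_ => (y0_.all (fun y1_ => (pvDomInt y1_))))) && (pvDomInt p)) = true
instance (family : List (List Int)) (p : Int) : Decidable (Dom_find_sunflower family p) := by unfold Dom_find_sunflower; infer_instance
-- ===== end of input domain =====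

-- B picks the candidate sets with combinations(family, p) directly and checks petal
-- disjointness in one accumulating pass instead of A's nested pairwise double loop.

-- ===== PORT A =====
-- the nested 'for i / for j in range(i+1, …)' disjointness test with its breaks
def chkA : List (List Int) → Bool
  | [] => true
  | x :: xs => (xs.all fun y => (PySem.Set.inter x y).isEmpty) && chkA xs

-- the outer 'for combo in combinations(range(len(family)), p)' loop
def loopA (family : List (List Int)) : List (List Nat) → List (List Int) × List Int
  | [] => ([], [])
  | combo :: rest =>
    let sets : List (List Int) := combo.map (fun i => PySem.Set.ofList (family.getD i []))
    let core : List Int :=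
      match sets with
      | [] => []   -- unreachable under Pre_ (p = 0: Python raises IndexError at sets[0])
      | s0 :: tl => tl.foldl (fun c s => PySem.Set.inter c s) s0
    let petals := sets.map (fun s => PySem.Set.diff s core)
    if chkA petals then (sets, core) else loopA family rest

def find_sunflower (family : List (List Int)) (p : Int) : List (List Int) × List Int :=
  loopA family (PySem.List.combinations (List.range family.length) p.toNat)

-- ===== PORT B =====
-- the one-pass 'for s in sets: … seen |= petal' check (false on break, true on else)
def chkB (core : List Int) : List (List Int) → List Int → Bool
  | [], _ => true
  | s :: rest, seen =>
    let petal := PySem.Set.diff s core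
    if (PySem.Set.inter petal seen).isEmpty then chkB core rest (PySem.Set.union seen petal)
    else false

-- the outer 'for combo in combinations(family, p)' loop
def loopB : List (List (List Int)) → List (List Int) × List Int
  | [] => ([], [])
  | sets :: rest =>
    let core : List Int :=
      match sets with
      | [] => []   -- unreachable under Pre_ (p = 0: Python raises IndexError at sets[0])
      | s0 :: tl => tl.foldl (fun c s => PySem.Set.inter c s) s0
    if chkB core sets [] then (sets, core) else loopB rest

def find_sunflower_alt (family : List (List Int)) (p : Int) : List (List Int) × List Int :=
  loopB (PySem.List.combinations (family.map (fun s => PySem.Set.ofList s)) p.toNat)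

-- ===== PRECONDITION & SPEC =====
-- Pre_ excludes p ≤ 0: p < 0 makes combinations raise ValueError and p = 0 yields the
-- empty combination, on which A's 'sets[0]' raises IndexError.
def Pre_find_sunflower (family : List (List Int)) (p : Int) : Prop := 1 ≤ p
instance (family : List (List Int)) (p : Int) : Decidable (Pre_find_sunflower family p) := by unfold Pre_find_sunflower; infer_instance

def pvWitness_find_sunflower : List (List Int) × Int := ([[1, 2], [1, 3]], 2)

def Spec_find_sunflower (family : List (List Int)) (p : Int) (out : List (List Int) × List Int) : Prop := out = find_sunflower_alt family p
instance (family : List (List Int)) (p : Int) (out : List (List Int) × List Int) : Decidable (Spec_find_sunflower family p out) := by unfold Spec_find_sunflower; infer_instance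

-- ===== CLAIM (what is proved, stated in full; the proofs are below) =====
def Claim_equal_find_sunflower : Prop := ∀ (family : List (List Int)) (p : Int), Dom_find_sunflower family p → Pre_find_sunflower family p → Spec_find_sunflower family p (find_sunflower family p)

-- ===== LEMMAS AND PROOFS =====

-- emptiness of an intersection, as membership
lemma inter_isEmpty_iff (a b : List Int) :
    (PySem.Set.inter a b).isEmpty = true ↔ ∀ x ∈ a, x ∉ b := by
  simp [PySem.Set.inter, List.isEmpty_iff, List.filter_eq_nil_iff]

lemma all_and_bool {α : Type} (l : List α) (f g : α → Bool) :
    (l.all fun t => f t && g t) = (l.all f && l.all g) := by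
  induction l with
  | nil => simp
  | cons x xs ih => simp only [List.all_cons, ih]; cases f x <;> cases g x <;> simp

-- one step of the accumulated-union test splits into old seen + the new petal
lemma inter_union_isEmpty (a b c : List Int) :
    (PySem.Set.inter a (PySem.Set.union b c)).isEmpty
      = ((PySem.Set.inter a b).isEmpty && (PySem.Set.inter a c).isEmpty) := by
  rw [Bool.eq_iff_iff]
  simp [PySem.Set.inter, List.isEmpty_iff, List.filter_eq_nil_iff, PySem.Set.mem_union]
  exact ⟨fun h => ⟨fun x hx => (h x hx).1, fun x hx => (h x hx).2⟩,
         fun h x hx => ⟨h.1 x hx, h.2 x hx⟩⟩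

lemma inter_isEmpty_comm (a b : List Int) :
    (PySem.Set.inter a b).isEmpty = (PySem.Set.inter b a).isEmpty := by
  rw [Bool.eq_iff_iff]
  simp only [inter_isEmpty_iff]
  exact ⟨fun h x hx hxa => h x hxa hx, fun h x hx hxb => h x hxb hx⟩

-- B's one-pass check = "no petal meets seen" + A's pairwise check
lemma chkB_eq (core : List Int) (sets : List (List Int)) (seen : List Int) :
    chkB core sets seen
      = ((sets.all fun s => (PySem.Set.inter (PySem.Set.diff s core) seen).isEmpty)
          && chkA (sets.map (fun s => PySem.Set.diff s core))) := by
  induction sets generalizing seen with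
  | nil => simp [chkB, chkA]
  | cons s rest ih =>
    by_cases h : (PySem.Set.inter (PySem.Set.diff s core) seen).isEmpty = true
    · rw [show chkB core (s :: rest) seen
          = chkB core rest (PySem.Set.union seen (PySem.Set.diff s core)) by simp [chkB, h]]
      rw [ih]
      simp only [List.all_cons, List.map_cons, chkA, inter_union_isEmpty, all_and_bool,
        List.all_map, h]
      have hc : ∀ t, (PySem.Set.inter (PySem.Set.diff t core) (PySem.Set.diff s core)).isEmpty
          = (PySem.Set.inter (PySem.Set.diff s core) (PySem.Set.diff t core)).isEmpty :=
        fun t => inter_isEmpty_comm _ _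
      simp only [hc]
      simp [Function.comp_def, Bool.and_assoc]
    · simp [chkB, h]

lemma chk_eq (core : List Int) (sets : List (List Int)) :
    chkA (sets.map (fun s => PySem.Set.diff s core)) = chkB core sets [] := by
  rw [chkB_eq]
  simp [PySem.Set.inter]

-- A's index combinations, mapped through the family, are B's set combinations
lemma loop_eq (family : List (List Int)) (cs : List (List Nat)) :
    loopA family cs
      = loopB (cs.map (List.map (fun i => PySem.Set.ofList (family.getD i [])))) := by
  induction cs with
  | nil => rfl
  | cons c rest ih => simp only [loopA, loopB, List.map_cons, chk_eq, ih]

lemma map_range_getD {α : Type} (l : List α) (d : α) :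
    (List.range l.length).map (fun i => l.getD i d) = l := by
  apply List.ext_getElem
  · simp
  · intro i h1 h2; simp [List.getD_eq_getElem?_getD, h2]

-- ===== VERDICT (by name: the statement is the Claim_ definition above) =====
theorem find_sunflower_spec : Claim_equal_find_sunflower := by
  intro family p _ _
  unfold Spec_find_sunflower find_sunflower find_sunflower_alt
  rw [loop_eq]
  have h1 : family.map (fun s => PySem.Set.ofList s)
      = (List.range family.length).map (fun i => PySem.Set.ofList (family.getD i [])) := by
    conv_lhs => rw [← map_range_getD family []]
    simp [List.map_map, Function.comp]
  rw [h1, PySem.List.combinations_map]
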